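-- pv_equiv track=rewrite | github.com/yshaaban/one-tool | python/src/onetool/commands/shared/json.py | _previous_non_whitespace_char
-- ===== SOURCE A (Python) =====
-- def _previous_non_whitespace_char(source_text: str, position: int) -> str | None:
--     index = position - 1
--     while index >= 0:
--         char = source_text[index]
--         if not char.isspace():
--             return char
--         index -= 1
--     return None
-- ===== SOURCE B (Python) =====
-- def _previous_non_whitespace_char(source_text: str, position: int) -> str | None:
--     stripped = source_text[:max(position, 0)].rstrip()
--     return stripped[-1] if stripped else None
-- ===== Notes on version B (the rewrite author's own statement) =====
-- stated objective: simpler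
-- what changed: Replaces A's character-by-character backward while-loop with a single slice of the prefix plus str.rstrip and one negative index.
import Mathlib
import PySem

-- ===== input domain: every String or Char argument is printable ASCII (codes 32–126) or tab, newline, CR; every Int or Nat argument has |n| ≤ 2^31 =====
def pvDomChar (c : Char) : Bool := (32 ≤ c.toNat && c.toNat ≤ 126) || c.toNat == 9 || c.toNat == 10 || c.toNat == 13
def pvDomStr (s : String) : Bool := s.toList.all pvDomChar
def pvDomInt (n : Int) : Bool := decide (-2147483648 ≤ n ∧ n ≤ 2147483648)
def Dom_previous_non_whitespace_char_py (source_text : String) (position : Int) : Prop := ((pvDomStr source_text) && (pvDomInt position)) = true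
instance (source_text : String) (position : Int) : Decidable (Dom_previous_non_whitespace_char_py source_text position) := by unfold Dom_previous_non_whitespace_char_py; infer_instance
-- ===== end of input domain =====

-- B replaces A's character-by-character backward while-loop with a single slice + rstrip
-- (objective: simpler); A raises IndexError when position > len(source_text), excluded by Pre_.


-- ===== PORT A =====
-- A's while-loop: index counts down from position-1; pyGet? = none is Python's IndexError
-- (reachable only when position > len, excluded by Pre_).
def pvALoop (s : List Char) (index : Int) : Option String :=
  if 0 ≤ index then
    match PySem.List.pyGet? s index with
    | none => none   -- IndexError (outside Pre_)
    | some c =>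
      if PySem.Chars.isspace c then pvALoop s (index - 1) else some (String.ofList [c])
  else none
  termination_by (index + 1).toNat
  decreasing_by omega

def previous_non_whitespace_char_py (source_text : String) (position : Int) : Option String :=
  pvALoop source_text.toList (position - 1)

-- ===== PORT B =====
-- Source B: stripped = source_text[:max(position,0)].rstrip(); return stripped[-1] if stripped else None
def previous_non_whitespace_char_py_alt (source_text : String) (position : Int) : Option String :=
  let stripped := PySem.Str.rstrip (PySem.Str.slice source_text none (some (max position 0)))
  if stripped.toList = [] then none
  else (PySem.Str.pyGet? stripped (-1)).map (fun c => String.ofList [c])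

-- ===== PRECONDITION & SPEC =====
-- Pre_ excludes exactly the inputs where A raises IndexError: position > len(source_text).
def Pre_previous_non_whitespace_char_py (source_text : String) (position : Int) : Prop :=
  position ≤ (source_text.toList.length : Int)
instance (source_text : String) (position : Int) : Decidable (Pre_previous_non_whitespace_char_py source_text position) := by unfold Pre_previous_non_whitespace_char_py; infer_instance

def pvWitness_previous_non_whitespace_char_py : String × Int := ("a b ", 4)

def Spec_previous_non_whitespace_char_py (source_text : String) (position : Int) (out : Option String) : Prop := out = previous_non_whitespace_char_py_alt source_text position
instance (source_text : String) (position : Int) (out : Option String) : Decidable (Spec_previous_non_whitespace_char_py source_text position out) := by unfold Spec_previous_non_whitespace_char_py; infer_instance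

-- ===== CLAIM (what is proved, stated in full; the proofs are below) =====
def Claim_equal_previous_non_whitespace_char_py : Prop := ∀ (source_text : String) (position : Int), Dom_previous_non_whitespace_char_py source_text position → Pre_previous_non_whitespace_char_py source_text position → Spec_previous_non_whitespace_char_py source_text position (previous_non_whitespace_char_py source_text position)

-- ===== LEMMAS AND PROOFS =====

-- A's loop from index i over the first i+1 characters computes the head of
-- dropWhile isspace on the reversed prefix.
theorem pvALoop_eq_nat (s : List Char) (n : Nat) (h : n ≤ s.length) :
    pvALoop s ((n : Int) - 1) =
      (((s.take n).reverse.dropWhile PySem.Chars.isspace).head?).map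
        (fun c => String.ofList [c]) := by
  induction n with
  | zero => simp [pvALoop]
  | succ n ih =>
    have hn : n < s.length := h
    rw [show ((n + 1 : Nat) : Int) - 1 = (n : Int) by push_cast; ring]
    rw [pvALoop]
    rw [if_pos (by positivity : (0:Int) ≤ (n:Int))]
    rw [PySem.List.pyGet?_ofNat _ _ hn]
    simp only [List.take_add_one, List.getElem?_eq_getElem hn, Option.toList_some,
      List.reverse_append, List.reverse_singleton, List.singleton_append, List.dropWhile_cons]
    by_cases hs : PySem.Chars.isspace s[n] = true
    · simp only [hs, if_pos]
      rw [ih (Nat.le_of_lt hn)]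
    · simp [hs]

theorem pvALoop_eq (s : List Char) (i : Int) (hle : i + 1 ≤ (s.length : Int)) :
    pvALoop s i =
      (((s.take (i + 1).toNat).reverse.dropWhile PySem.Chars.isspace).head?).map
        (fun c => String.ofList [c]) := by
  by_cases h : 0 ≤ i
  · have : i = ((i + 1).toNat : Int) - 1 := by omega
    rw [this, pvALoop_eq_nat s (i + 1).toNat (by omega)]
    have e : ((i + 1).toNat : Int) - 1 + 1 = ((i + 1).toNat : Int) := by ring
    rw [e, Int.toNat_natCast]
  · have h0 : (i + 1).toNat = 0 := by omega
    rw [h0]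
    simp [pvALoop, h]

theorem alt_char (s : String) (p : Int) :
    previous_non_whitespace_char_py_alt s p =
      (((s.toList.take (max p 0).toNat).reverse.dropWhile PySem.Chars.isspace).head?).map
        (fun c => String.ofList [c]) := by
  unfold previous_non_whitespace_char_py_alt
  simp only [PySem.Str.rstrip, PySem.Str.slice, PySem.Chars.rstrip,
    PySem.Chars.slice_eq_listSlice, String.toList_ofList]
  rw [PySem.List.slice_to _ (le_max_right p 0)]
  cases h : (s.toList.take (max p 0).toNat).reverse.dropWhile PySem.Chars.isspace with
  | nil => simp
  | cons c t =>
    rw [if_neg (by simp)]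
    simp [PySem.List.pyGet?_neg_one]

theorem previous_non_whitespace_char_py_spec : Claim_equal_previous_non_whitespace_char_py := by
  intro s p _ hpre
  unfold Spec_previous_non_whitespace_char_py
  unfold previous_non_whitespace_char_py
  unfold Pre_previous_non_whitespace_char_py at hpre
  rw [pvALoop_eq s.toList (p - 1) (by omega), alt_char]
  rw [show (max p 0).toNat = (p - 1 + 1).toNat by omega]
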